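-- pv_equiv track=rewrite | github.com/akashanup/programming | SubarraysWithDistinctCharacters/solution.py | distinctSubarraysLengthSum
-- ===== SOURCE A (Python) =====
-- def distinctSubarraysLengthSum(nums):
--     hashset = set()
--     start, end = 0, 0
--     lengthSum = 0
--     while start < len(nums):
--         while end < len(nums) and nums[end] not in hashset:
--             hashset.add(nums[end])
--             end += 1
--         """
--             If we know all elements in a subarray arr[i..j] are distinct, sum of all lengths of distinct element subarrays in this sub array is ((j-i+1)*(j-i+2))/2.
--             How? the possible lengths of subarrays are 1, 2, 3,……, j – i +1. So, the sum will be ((j – i +1)*(j – i +2))/2.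
--             We first find largest subarray (with distinct elements) starting from first element.
--             We count sum of lengths in this subarray using above formula.
--             For finding next subarray of the distinct element, we increment starting point, i and ending point, j unless (i+1, j) are distinct.
--             If not possible, then we increment i again and move forward the same way.
--         """
--         lengthSum += (end-start)*(end-start+1) // 2
--         hashset.remove(nums[start])
--         start += 1
--     return lengthSum
-- ===== SOURCE B (Python) =====
-- def distinctSubarraysLengthSum(nums):
--     # For each start index independently, scan forward with a fresh set to find
--     # the longest distinct run L starting there, and add L*(L+1)//2.
--     total = 0
--     n = len(nums)
--     for i in range(n):
--         seen = set()
--         j = i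
--         while j < n and nums[j] not in seen:
--             seen.add(nums[j])
--             j += 1
--         L = j - i
--         total += L * (L + 1) // 2
--     return total
-- ===== Notes on version B (the rewrite author's own statement) =====
-- stated objective: simpler
-- what changed: Replaces A's single non-resetting two-pointer sliding window with shared mutable set by an independent per-start forward scan using a fresh set for each start index.
import Mathlib
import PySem

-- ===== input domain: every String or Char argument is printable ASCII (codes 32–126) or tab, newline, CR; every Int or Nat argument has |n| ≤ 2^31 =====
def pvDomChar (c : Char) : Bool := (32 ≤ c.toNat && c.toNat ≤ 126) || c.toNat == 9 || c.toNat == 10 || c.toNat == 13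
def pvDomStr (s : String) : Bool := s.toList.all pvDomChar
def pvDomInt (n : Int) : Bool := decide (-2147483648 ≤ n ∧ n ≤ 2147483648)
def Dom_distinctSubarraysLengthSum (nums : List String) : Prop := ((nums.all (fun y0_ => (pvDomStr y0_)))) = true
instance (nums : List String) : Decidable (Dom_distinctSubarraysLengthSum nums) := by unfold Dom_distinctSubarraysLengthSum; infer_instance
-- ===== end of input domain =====

-- B replaces A's non-resetting two-pointer sliding window (one shared mutable set) with an
-- independent per-start forward scan using a fresh set for each start; simpler, not faster.

-- ===== PORT A =====
-- inner `while end < len(nums) and nums[end] not in hashset: hashset.add(nums[end]); end += 1`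
def innerLoopA (nums : List String) (hashset : PySem.Set String) (e : Nat) :
    PySem.Set String × Nat :=
  if h : e < nums.length ∧ PySem.Set.contains hashset (nums.getD e "") = false then
    innerLoopA nums (PySem.Set.add hashset (nums.getD e "")) (e + 1)
  else (hashset, e)
termination_by nums.length - e
decreasing_by omega

-- outer `while start < len(nums)` loop; `hashset.remove(nums[start])`: the element is always
-- in the window set at that point (Python never raises KeyError here), so `discard` is exact.
def outerLoopA (nums : List String) (hashset : PySem.Set String) (s e : Nat) (acc : Int) : Int :=
  if _h : s < nums.length then
    let p := innerLoopA nums hashset e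
    let acc' := acc + PySem.Int.floordiv (((p.2 : Int) - s) * ((p.2 : Int) - s + 1)) 2
    outerLoopA nums (PySem.Set.discard p.1 (nums.getD s "")) (s + 1) p.2 acc'
  else acc
termination_by nums.length - s
decreasing_by omega

def distinctSubarraysLengthSum (nums : List String) : Int :=
  outerLoopA nums PySem.Set.empty 0 0 0

-- ===== PORT B =====
-- `while j < n and nums[j] not in seen: seen.add(nums[j]); j += 1` with a fresh set;
-- returns L = j - i, phrased on the suffix nums[i:] of the list.
def runLenB (seen : PySem.Set String) : List String → Nat
  | [] => 0
  | x :: xs => if PySem.Set.contains seen x then 0 else 1 + runLenB (PySem.Set.add seen x) xs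

-- `for i in range(n)`: one step per suffix nums[i:]; per start add L*(L+1)//2
def altGoB : List String → Int
  | [] => 0
  | x :: xs =>
    let L := runLenB PySem.Set.empty (x :: xs)
    PySem.Int.floordiv ((L : Int) * ((L : Int) + 1)) 2 + altGoB xs

def distinctSubarraysLengthSum_alt (nums : List String) : Int := altGoB nums

-- ===== PRECONDITION & SPEC =====
def Spec_distinctSubarraysLengthSum (nums : List String) (out : Int) : Prop := out = distinctSubarraysLengthSum_alt nums
instance (nums : List String) (out : Int) : Decidable (Spec_distinctSubarraysLengthSum nums out) := by unfold Spec_distinctSubarraysLengthSum; infer_instance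

-- ===== CLAIM (what is proved, stated in full; the proofs are below) =====
def Claim_equal_distinctSubarraysLengthSum : Prop := ∀ (nums : List String), Dom_distinctSubarraysLengthSum nums → Spec_distinctSubarraysLengthSum nums (distinctSubarraysLengthSum nums)

-- ===== LEMMAS AND PROOFS =====

theorem set_add_of_not_mem (s : PySem.Set String) (x : String) (h : x ∉ s) :
    PySem.Set.add s x = s ++ [x] := by
  simp [PySem.Set.add, h]

theorem discard_cons_self (x : String) (t : List String) (h : x ∉ t) :
    PySem.Set.discard (x :: t) x = t := by
  have hall : ∀ y ∈ t, (!y == x) = true := by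
    intro y hy
    simp only [Bool.not_eq_eq_eq_not, Bool.not_true, beq_eq_false_iff_ne]
    intro he; exact h (he ▸ hy)
  simp [PySem.Set.discard, List.filter_eq_self.mpr hall]

theorem runLenB_le_length : ∀ (l : List String) (s : PySem.Set String), runLenB s l ≤ l.length := by
  intro l
  induction l with
  | nil => intro s; simp [runLenB]
  | cons x xs ih =>
    intro s
    simp only [runLenB, List.length_cons]
    split
    · omega
    · have := ih (PySem.Set.add s x); omega

theorem foldl_add_of_nodup : ∀ (l : List String) (s : PySem.Set String),
    (s ++ l).Nodup → l.foldl PySem.Set.add s = s ++ l := by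
  intro l
  induction l with
  | nil => intro s _; simp
  | cons x xs ih =>
    intro s hnd
    have hx : x ∉ s := fun hmem =>
      List.disjoint_of_nodup_append hnd hmem List.mem_cons_self
    rw [List.foldl_cons, set_add_of_not_mem s x hx, ih (s ++ [x]) (by simpa using hnd)]
    simp

theorem runLenB_take_nodup : ∀ (l : List String) (s : PySem.Set String), s.Nodup →
    (s ++ l.take (runLenB s l)).Nodup := by
  intro l
  induction l with
  | nil => intro s hs; simpa [runLenB] using hs
  | cons x xs ih =>
    intro s hs
    by_cases hc : PySem.Set.contains s x = true
    · have hxs : x ∈ s := by simpa [PySem.Set.contains_iff] using hc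
      simp [runLenB, hxs, hs]
    · have hx : x ∉ s := by
        intro hmem; exact hc (by simpa [PySem.Set.contains_iff] using hmem)
      have hsx : (PySem.Set.add s x).Nodup := by
        rw [set_add_of_not_mem s x hx]
        simpa [List.nodup_append] using ⟨hs, fun y hy he => hx (he ▸ hy)⟩
      have H := ih (PySem.Set.add s x) hsx
      rw [set_add_of_not_mem s x hx] at H
      have hrun : runLenB s (x :: xs) = runLenB (PySem.Set.add s x) xs + 1 := by
        simp [runLenB, hx, Nat.add_comm]
      rw [hrun, set_add_of_not_mem s x hx, List.take_succ_cons]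
      simpa [List.append_assoc] using H

theorem runLenB_append (l₂ : List String) : ∀ (l₁ : List String) (s : PySem.Set String),
    l₁.Nodup → (∀ x ∈ l₁, x ∉ s) →
    runLenB s (l₁ ++ l₂) = l₁.length + runLenB (l₁.foldl PySem.Set.add s) l₂ := by
  intro l₁
  induction l₁ with
  | nil => intro s _ _; simp
  | cons x xs ih =>
    intro s hnd hdisj
    have hx : x ∉ s := hdisj x List.mem_cons_self
    have hc : PySem.Set.contains s x = false := by
      simpa [PySem.Set.contains_iff] using hx
    have hdisj' : ∀ y ∈ xs, y ∉ PySem.Set.add s x := by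
      intro y hy
      rw [set_add_of_not_mem s x hx]
      simp only [List.mem_append, List.mem_singleton]
      rintro (hys | rfl)
      · exact hdisj y (List.mem_cons_of_mem _ hy) hys
      · exact (List.nodup_cons.mp hnd).1 hy
    rw [List.cons_append]
    simp only [runLenB, hc, Bool.false_eq_true, ite_false]
    rw [ih (PySem.Set.add s x) (List.nodup_cons.mp hnd).2 hdisj']
    simp [List.foldl_cons]
    omega

theorem innerLoopA_eq (nums : List String) : ∀ (e : Nat) (h : PySem.Set String),
    innerLoopA nums h e =
      (((nums.drop e).take (runLenB h (nums.drop e))).foldl PySem.Set.add h,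
       e + runLenB h (nums.drop e)) := by
  intro e h
  fun_induction innerLoopA nums h e with
  | case1 h e hc ih =>
    obtain ⟨he, hm⟩ := hc
    have hx : nums.getD e "" = nums[e] := by
      simp [List.getD_eq_getElem?_getD, List.getElem?_eq_getElem he]
    have hd : nums.drop e = nums[e] :: nums.drop (e + 1) := List.drop_eq_getElem_cons he
    rw [hx] at ih hm ⊢
    have hmem : nums[e] ∉ h := by simpa [PySem.Set.contains_iff] using hm
    have hrun : runLenB h (nums.drop e) = runLenB (PySem.Set.add h (nums[e])) (nums.drop (e + 1)) + 1 := by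
      rw [hd]; simp [runLenB, hmem, Nat.add_comm]
    rw [ih, hrun, hd, List.take_succ_cons, List.foldl_cons]
    simp only [Prod.mk.injEq]
    exact ⟨trivial, by omega⟩
  | case2 h e hc =>
    rcases Nat.lt_or_ge e nums.length with he | he
    · have hm : PySem.Set.contains h (nums.getD e "") = true := by
        rcases Bool.eq_false_or_eq_true (PySem.Set.contains h (nums.getD e "")) with h' | h'
        · exact h'
        · exact absurd ⟨he, h'⟩ hc
      have hx : nums.getD e "" = nums[e] := by
        simp [List.getD_eq_getElem?_getD, List.getElem?_eq_getElem he]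
      rw [hx] at hm
      have hmem : nums[e] ∈ h := by simpa [PySem.Set.contains_iff] using hm
      have hd : nums.drop e = nums[e] :: nums.drop (e + 1) := List.drop_eq_getElem_cons he
      rw [hd]
      simp [runLenB, hmem]
    · have hd : nums.drop e = [] := List.drop_eq_nil_of_le he
      simp [hd, runLenB]

theorem outerLoopA_eq (nums : List String) : ∀ (k s e : Nat) (acc : Int),
    nums.length ≤ s + k → s ≤ e → e ≤ nums.length →
    ((nums.drop s).take (e - s)).Nodup →
    outerLoopA nums ((nums.drop s).take (e - s)) s e acc = acc + altGoB (nums.drop s) := by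
  intro k
  induction k with
  | zero =>
    intro s e acc hk hse hen hnd
    rw [outerLoopA]
    have hs : ¬ s < nums.length := by omega
    have hd : nums.drop s = [] := List.drop_eq_nil_of_le (by omega)
    simp [hs, hd, altGoB]
  | succ k ih =>
    intro s e acc hk hse hen hnd
    by_cases hs : s < nums.length
    · have hdrop : nums.drop s = nums[s] :: nums.drop (s + 1) := List.drop_eq_getElem_cons hs
      have hwlen : ((nums.drop s).take (e - s)).length = e - s := by
        simp [List.length_take, List.length_drop]; omega
      have hsplit : nums.drop s = (nums.drop s).take (e - s) ++ nums.drop e := by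
        have h1 : List.drop (e - s) (nums.drop s) = nums.drop e := by
          rw [List.drop_drop]; congr 1; omega
        conv_lhs => rw [← List.take_append_drop (e - s) (nums.drop s)]
        rw [h1]
      set w := (nums.drop s).take (e - s) with hw
      set k0 := runLenB w (nums.drop e) with hk0
      have hfold0 : w.foldl PySem.Set.add PySem.Set.empty = w :=
        foldl_add_of_nodup w PySem.Set.empty (by simpa [PySem.Set.empty] using hnd)
      have hL : runLenB PySem.Set.empty (nums.drop s) = (e - s) + k0 := by
        rw [hsplit, runLenB_append _ w _ hnd (by simp [PySem.Set.empty]), hfold0, hwlen]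
      have hk0len : k0 ≤ nums.length - e := by
        have := runLenB_le_length (nums.drop e) w
        simpa [List.length_drop] using this
      have hL1 : 1 ≤ (e - s) + k0 := by
        rw [← hL, hdrop]
        have : PySem.Set.contains PySem.Set.empty (nums[s]) = false := by
          simp [PySem.Set.contains, PySem.Set.empty]
        simp only [runLenB, this, Bool.false_eq_true, ite_false]
        omega
      have hnd2 : (w ++ (nums.drop e).take k0).Nodup := runLenB_take_nodup (nums.drop e) w hnd
      have hfold : ((nums.drop e).take k0).foldl PySem.Set.add w = w ++ (nums.drop e).take k0 :=
        foldl_add_of_nodup _ w hnd2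
      have hw2 : w ++ (nums.drop e).take k0
          = nums[s] :: (nums.drop (s + 1)).take ((e - s) + k0 - 1) := by
        have h2 : (nums.drop s).take ((e - s) + k0) = w ++ (nums.drop e).take k0 := by
          conv_lhs => rw [hsplit]
          rw [List.take_append, List.take_of_length_le (by omega), hwlen]
          congr 2
          omega
        rw [← h2, hdrop]
        obtain ⟨m, hm⟩ : ∃ m, (e - s) + k0 = m + 1 := ⟨(e - s) + k0 - 1, by omega⟩
        rw [hm, List.take_succ_cons, Nat.add_sub_cancel]
      have hgetD : nums.getD s "" = nums[s] := by
        simp [List.getD_eq_getElem?_getD, List.getElem?_eq_getElem hs]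
      have hndtail : (nums[s] :: (nums.drop (s + 1)).take ((e - s) + k0 - 1)).Nodup := hw2 ▸ hnd2
      have hdisc : PySem.Set.discard (w ++ (nums.drop e).take k0) (nums[s])
          = (nums.drop (s + 1)).take ((e - s) + k0 - 1) := by
        rw [hw2]
        exact discard_cons_self _ _ (List.nodup_cons.mp hndtail).1
      -- unfold one step of the outer loop
      rw [outerLoopA, dif_pos hs, innerLoopA_eq nums e w]
      simp only [← hk0, hfold, hgetD, hdisc]
      have harg : (e - s) + k0 - 1 = (e + k0) - (s + 1) := by omega
      rw [harg]
      rw [ih (s + 1) (e + k0) _ (by omega) (by omega) (by omega)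
        (by rw [← harg]; exact (List.nodup_cons.mp hndtail).2)]
      -- arithmetic: the triangular term equals B's term for this start
      conv_rhs => rw [hdrop]
      simp only [altGoB, ← hdrop, hL]
      have hcast : ((e + k0 : Nat) : Int) - (s : Nat) = (((e - s) + k0 : Nat) : Int) := by
        push_cast [Nat.cast_sub hse]
        ring
      rw [hcast]
      ring
    · rw [outerLoopA]
      have hd : nums.drop s = [] := List.drop_eq_nil_of_le (by omega)
      simp [hs, hd, altGoB]

-- ===== VERDICT (by name: the statement is the Claim_ definition above) =====
theorem distinctSubarraysLengthSum_spec : Claim_equal_distinctSubarraysLengthSum := by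
  intro nums _
  unfold Spec_distinctSubarraysLengthSum distinctSubarraysLengthSum distinctSubarraysLengthSum_alt
  have := outerLoopA_eq nums nums.length 0 0 0 (by omega) (le_refl 0) (Nat.zero_le _) (by simp)
  simpa [PySem.Set.empty] using this
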